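-- pv_equiv track=rewrite | github.com/Md-Hasib-Askari/leetcode-solutions | 1d_dp/climbStairs.py | solve_dp
-- ===== SOURCE A (Python) =====
-- def solve_dp(n: int) -> int:
--     if n <= 2:
--         return n
--
--     dp = [0] * (n + 1)
--     dp[1], dp[2] = 1, 2
--
--     for i in range(3, n + 1):
--         dp[i] = dp[i - 1] + dp[i - 2]
--
--     return dp[n]
-- ===== SOURCE B (Python) =====
-- def solve_dp(n: int) -> int:
--     # Fast-doubling Fibonacci: solve_dp(n) = F(n+1) with F(1)=F(2)=1, in O(log n) steps.
--     if n <= 2: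
--         return n
--
--     def fib_pair(k: int):
--         # returns (F(k), F(k+1))
--         if k == 0:
--             return (0, 1)
--         a, b = fib_pair(k // 2)
--         c = a * (2 * b - a)
--         d = a * a + b * b
--         if k % 2 == 1:
--             return (d, c + d)
--         return (c, d)
--
--     return fib_pair(n + 1)[0]
-- ===== Notes on version B (the rewrite author's own statement) =====
-- stated objective: faster
-- what changed: Replaced the O(n) DP array with recursive fast-doubling Fibonacci computing (F(k), F(k+1)) by halving k; intended as faster, measured over 100x at the largest size where both implementations finished.
import Mathlib
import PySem

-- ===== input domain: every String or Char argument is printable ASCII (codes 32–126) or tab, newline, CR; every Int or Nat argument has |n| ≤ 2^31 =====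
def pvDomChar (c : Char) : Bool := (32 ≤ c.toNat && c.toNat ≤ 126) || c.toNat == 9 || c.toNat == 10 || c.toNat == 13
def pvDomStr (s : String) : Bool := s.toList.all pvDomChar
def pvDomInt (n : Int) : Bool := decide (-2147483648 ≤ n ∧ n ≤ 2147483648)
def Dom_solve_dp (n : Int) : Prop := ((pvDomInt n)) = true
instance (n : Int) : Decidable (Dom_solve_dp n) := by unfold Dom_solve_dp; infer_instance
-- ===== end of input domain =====

-- B replaces the O(n) DP array with recursive fast-doubling Fibonacci ((F(k),F(k+1)) by halving k); intended as faster, measured over 100x at the largest size both implementations finished.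

-- ===== PORT A =====
def solve_dp (n : Int) : Int :=
  if n ≤ 2 then n
  else
    let dp := List.replicate (n + 1).toNat (0 : Int)
    let dp := PySem.List.pySetD dp 1 1
    let dp := PySem.List.pySetD dp 2 2
    let dp := (PySem.List.pyRange 3 (n + 1) 1).foldl
      (fun dp i =>
        PySem.List.pySetD dp i (PySem.List.pyGetD dp (i - 1) 0 + PySem.List.pyGetD dp (i - 2) 0)) dp
    PySem.List.pyGetD dp n 0

-- ===== PORT B =====
-- fib_pair k = (F(k), F(k+1)) by fast doubling, exactly as in Source B
def fib_pair : Nat → Int × Int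
  | 0 => (0, 1)
  | (k + 1) =>
    let p := fib_pair ((k + 1) / 2)
    let a := p.1
    let b := p.2
    let c := a * (2 * b - a)
    let d := a * a + b * b
    if (k + 1) % 2 = 1 then (d, c + d) else (c, d)
decreasing_by exact Nat.div_lt_self (Nat.succ_pos k) (by omega)

def solve_dp_alt (n : Int) : Int :=
  if n ≤ 2 then n else (fib_pair (n + 1).toNat).1

-- ===== PRECONDITION & SPEC =====
def Spec_solve_dp (n : Int) (out : Int) : Prop := out = solve_dp_alt n
instance (n : Int) (out : Int) : Decidable (Spec_solve_dp n out) := by unfold Spec_solve_dp; infer_instance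

-- ===== CLAIM (what is proved, stated in full; the proofs are below) =====
def Claim_equal_solve_dp : Prop := ∀ (n : Int), Dom_solve_dp n → Spec_solve_dp n (solve_dp n)

-- ===== LEMMAS AND PROOFS =====

-- fast doubling computes Fibonacci pairs
theorem fib_pair_eq (k : Nat) : fib_pair k = ((Nat.fib k : Int), (Nat.fib (k + 1) : Int)) := by
  induction k using Nat.strong_induction_on with
  | _ k ih =>
    match k with
    | 0 => simp [fib_pair]
    | (k + 1) =>
      rw [fib_pair]
      rw [ih ((k + 1) / 2) (Nat.div_lt_self (Nat.succ_pos k) (by omega))]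
      set m := (k + 1) / 2 with hm
      have hfib2m : (Nat.fib (2 * m) : Int) = (Nat.fib m : Int) * (2 * (Nat.fib (m + 1) : Int) - (Nat.fib m : Int)) := by
        have hle : Nat.fib m ≤ 2 * Nat.fib (m + 1) := le_trans (Nat.fib_le_fib_succ) (by omega)
        have := Nat.fib_two_mul m
        calc (Nat.fib (2 * m) : Int) = ((Nat.fib m * (2 * Nat.fib (m + 1) - Nat.fib m) : Nat) : Int) := by rw [this]
          _ = (Nat.fib m : Int) * (2 * (Nat.fib (m + 1) : Int) - (Nat.fib m : Int)) := by
              push_cast [Nat.cast_sub hle]; ring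
      have hfib2m1 : (Nat.fib (2 * m + 1) : Int) = (Nat.fib m : Int) * (Nat.fib m : Int) + (Nat.fib (m + 1) : Int) * (Nat.fib (m + 1) : Int) := by
        have := Nat.fib_two_mul_add_one m
        rw [this]; push_cast; ring
      by_cases hpar : (k + 1) % 2 = 1
      · have hk : k + 1 = 2 * m + 1 := by omega
        simp only [hk]
        rw [if_pos (show (2 * m + 1) % 2 = 1 by omega), Prod.mk.injEq]
        refine ⟨hfib2m1.symm, ?_⟩
        have h2 : 2 * m + 1 + 1 = 2 * m + 2 := by ring
        rw [h2, Nat.fib_add_two]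
        push_cast
        linear_combination -hfib2m - hfib2m1
      · have hk : k + 1 = 2 * m := by omega
        simp only [hk]
        rw [if_neg (show ¬ (2 * m % 2 = 1) by omega), Prod.mk.injEq]
        exact ⟨hfib2m.symm, hfib2m1.symm⟩

-- the DP loop invariant: after folding range 3..m the list has unchanged length,
-- entry m-2 holds fib(m-1) and entry m-1 holds fib(m)  (dp[j] = Nat.fib (j+1))
theorem dp_loop_inv (n : Int) (hn : 3 ≤ n) (m : Int) (h3 : 3 ≤ m) (hmn : m ≤ n + 1) :
    let dp0 := PySem.List.pySetD (PySem.List.pySetD (List.replicate (n + 1).toNat (0 : Int)) 1 1) 2 2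
    let L := (PySem.List.pyRange 3 m 1).foldl
      (fun dp i =>
        PySem.List.pySetD dp i (PySem.List.pyGetD dp (i - 1) 0 + PySem.List.pyGetD dp (i - 2) 0)) dp0
    L.length = (n + 1).toNat ∧
    PySem.List.pyGetD L (m - 2) 0 = (Nat.fib (m - 1).toNat : Int) ∧
    PySem.List.pyGetD L (m - 1) 0 = (Nat.fib m.toNat : Int) := by
  intro dp0
  have hN : 4 ≤ (n + 1).toNat := by omega
  have hlen0 : dp0.length = (n + 1).toNat := by
    simp [dp0, PySem.List.length_pySetD]
  -- induction on t with m = 3 + t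
  obtain ⟨t, ht⟩ : ∃ t : Nat, m = 3 + (t : Int) := ⟨(m - 3).toNat, by omega⟩
  subst ht
  clear h3
  induction t with
  | zero =>
    simp only [Nat.cast_zero, add_zero]
    rw [PySem.List.pyRange_one_eq_nil (by omega)]
    simp only [List.foldl_nil]
    refine ⟨hlen0, ?_, ?_⟩
    · show PySem.List.pyGetD dp0 (3 - 2) 0 = (Nat.fib ((3:Int) - 1).toNat : Int)
      have e1 : (3:Int) - 2 = 1 := by norm_num
      have e2 : ((3:Int) - 1).toNat = 2 := rfl
      rw [e1, e2]
      rw [show dp0 = PySem.List.pySetD (PySem.List.pySetD (List.replicate (n + 1).toNat (0 : Int)) 1 1) 2 2 from rfl,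
        PySem.List.pySetD_of_nonneg _ _ (by omega), PySem.List.pySetD_of_nonneg _ _ (by omega),
        PySem.List.pyGetD_of_nonneg _ _ (by omega),
        show ((1:Int)).toNat = 1 from rfl, show ((2:Int)).toNat = 2 from rfl]
      rw [List.getD_eq_getElem _ _ (by simp [List.length_set]; omega)]
      simp
    · show PySem.List.pyGetD dp0 (3 - 1) 0 = (Nat.fib ((3:Int)).toNat : Int)
      have e1 : (3:Int) - 1 = 2 := by norm_num
      have e2 : ((3:Int)).toNat = 3 := rfl
      rw [e1, e2]
      rw [show dp0 = PySem.List.pySetD (PySem.List.pySetD (List.replicate (n + 1).toNat (0 : Int)) 1 1) 2 2 from rfl,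
        PySem.List.pySetD_of_nonneg _ _ (by omega), PySem.List.pySetD_of_nonneg _ _ (by omega),
        PySem.List.pyGetD_of_nonneg _ _ (by omega),
        show ((1:Int)).toNat = 1 from rfl, show ((2:Int)).toNat = 2 from rfl]
      rw [List.getD_eq_getElem _ _ (by simp [List.length_set]; omega)]
      simp
      decide
  | succ t ih =>
    have hstep : (3 : Int) + ((t + 1 : Nat) : Int) = (3 + (t : Int)) + 1 := by push_cast; ring
    rw [hstep]
    set m := (3 : Int) + (t : Int) with hmdef
    have hm3 : 3 ≤ m := by omega
    have hmn' : m ≤ n := by push_cast at hmn; omega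
    obtain ⟨hlen, hA, hB⟩ := ih (by omega)
    rw [PySem.List.pyRange_one_succ_right (by omega), List.foldl_append]
    set L := (PySem.List.pyRange 3 m 1).foldl
      (fun dp i =>
        PySem.List.pySetD dp i (PySem.List.pyGetD dp (i - 1) 0 + PySem.List.pyGetD dp (i - 2) 0)) dp0 with hL
    simp only [List.foldl_cons, List.foldl_nil]
    have hmlt : m.toNat < L.length := by omega
    have hset : PySem.List.pySetD L m (PySem.List.pyGetD L (m - 1) 0 + PySem.List.pyGetD L (m - 2) 0)
        = L.set m.toNat (PySem.List.pyGetD L (m - 1) 0 + PySem.List.pyGetD L (m - 2) 0) := by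
      rw [PySem.List.pySetD_of_nonneg _ _ (by omega)]
    rw [hset]
    set v := PySem.List.pyGetD L (m - 1) 0 + PySem.List.pyGetD L (m - 2) 0 with hv
    refine ⟨by simp [List.length_set, hlen], ?_, ?_⟩
    · -- index (m+1)-2 = m-1 : unchanged by the set at m
      have : m + 1 - 2 = m - 1 := by ring
      rw [this]
      rw [PySem.List.pyGetD_of_nonneg _ _ (by omega), List.getD_eq_getElem _ _ (by simp [List.length_set]; omega)]
      rw [List.getElem_set]
      have hne : ¬ (m.toNat = (m - 1).toNat) := by omega
      rw [if_neg hne]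
      rw [PySem.List.pyGetD_of_nonneg _ _ (by omega)] at hB
      rw [List.getD_eq_getElem _ _ (by omega)] at hB
      have : m + 1 - 1 = m := by ring
      rw [this]
      exact hB
    · -- index (m+1)-1 = m : the freshly written value = fib(m-1)+fib(m) = fib(m+1)
      have : m + 1 - 1 = m := by ring
      rw [this]
      rw [PySem.List.pyGetD_of_nonneg _ _ (by omega), List.getD_eq_getElem _ _ (by simp [List.length_set]; omega)]
      rw [List.getElem_set, if_pos rfl, hv, hB, hA]
      obtain ⟨s, hs⟩ : ∃ s : Nat, m.toNat = s + 2 := ⟨m.toNat - 2, by omega⟩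
      have h1 : (m + 1).toNat = s + 3 := by omega
      have h2 : (m - 1).toNat = s + 1 := by omega
      rw [h1, h2, hs]
      have hf : Nat.fib (s + 3) = Nat.fib (s + 1) + Nat.fib (s + 2) := by
        rw [show s + 3 = (s + 1) + 2 from by ring, Nat.fib_add_two]
      rw [hf]
      push_cast; ring

-- ===== VERDICT (by name: the statement is the Claim_ definition above) =====
theorem solve_dp_spec : Claim_equal_solve_dp := by
  intro n _
  unfold Spec_solve_dp solve_dp solve_dp_alt
  by_cases h : n ≤ 2
  · simp [h]
  · simp only [h, if_false]
    have hn : 3 ≤ n := by omega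
    have := dp_loop_inv n hn (n + 1) (by omega) (le_refl _)
    simp only at this
    obtain ⟨hlen, hA, hB⟩ := this
    have h1 : n + 1 - 1 = n := by ring
    rw [h1] at hB
    rw [hB, fib_pair_eq]
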